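-- pv_equiv track=rewrite | github.com/OrSimhon/Python-course-cs-BGU | HW_2_Functions_Advanced_Loops/Q3.py | max_series
-- ===== SOURCE A (Python) =====
-- def max_series(numbers):
--     divided_by_three = -1
--     odd_nums = []
--     idx = 0
--     increase = True
--
--     for num in numbers:
--         if num % 2 != 0:  # Odd num
--             if len(odd_nums) == 0:
--                 odd_nums.append(num)
--                 idx += 1
--             elif num > odd_nums[idx - 1] and increase:
--                 odd_nums.append(num)
--                 idx += 1
--             else:
--                 increase = False
--         if num % 3 == 0 and num > divided_by_three:
--             divided_by_three = num
--
--     return [idx, divided_by_three]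
-- ===== SOURCE B (Python) =====
-- def max_series(numbers):
--     nums = list(numbers)
--     odds = [n for n in nums if n % 2 != 0]
--     count = 0
--     prev = None
--     for n in odds:
--         if prev is None or n > prev:
--             count += 1
--             prev = n
--         else:
--             break
--     best3 = max([n for n in nums if n % 3 == 0] + [-1])
--     return [count, best3]
-- ===== Notes on version B (the rewrite author's own statement) =====
-- stated objective: simpler
-- what changed: A's single fused pass with a grown odd_nums list, an idx counter and an 'increase' flag is replaced by filtering once into the odd and multiple-of-3 sublists, counting the strictly increasing prefix of the odds with a simple break loop, and taking the max of the multiples of 3 with a floor of minus one.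
import Mathlib
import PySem

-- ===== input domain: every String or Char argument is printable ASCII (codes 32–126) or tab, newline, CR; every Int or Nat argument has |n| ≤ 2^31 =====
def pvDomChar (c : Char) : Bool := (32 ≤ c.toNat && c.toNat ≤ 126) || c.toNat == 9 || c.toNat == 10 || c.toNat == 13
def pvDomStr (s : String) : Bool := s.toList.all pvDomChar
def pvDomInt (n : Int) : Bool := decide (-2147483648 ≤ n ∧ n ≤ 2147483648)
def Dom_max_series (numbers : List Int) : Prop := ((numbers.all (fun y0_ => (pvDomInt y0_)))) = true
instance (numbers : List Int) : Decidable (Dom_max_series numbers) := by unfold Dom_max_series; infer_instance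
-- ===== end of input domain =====

-- B replaces A's fused one-pass accumulator (odd_nums list + idx + increase flag) by filter-then-process:
-- count the strictly increasing prefix of the odd elements, and take the max of the multiples of 3 floored at minus one; same cost, simpler.

-- ===== PORT A =====
-- the loop body of A, on the state (divided_by_three, odd_nums, idx, increase)
def pvStepA : Int × List Int × Int × Bool → Int → Int × List Int × Int × Bool
  | (d3, odds, idx, inc), num =>
    let st2 : List Int × Int × Bool :=
      if PySem.Int.mod num 2 ≠ 0 then
        if odds.length = 0 then (odds ++ [num], idx + 1, inc)
        -- odd_nums[idx - 1]: idx = len(odd_nums) throughout A's loop, so this index is always in range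
        else if num > PySem.List.pyGetD odds (idx - 1) 0 ∧ inc = true then (odds ++ [num], idx + 1, inc)
        else (odds, idx, false)
      else (odds, idx, inc)
    let d3' := if PySem.Int.mod num 3 = 0 ∧ num > d3 then num else d3
    (d3', st2)

def max_series (numbers : List Int) : List Int :=
  let s := numbers.foldl pvStepA (-1, [], 0, true)
  [s.2.2.1, s.1]

-- ===== PORT B =====
-- the for-loop of B: count, with prev : Option Int, breaking at the first non-increase
def pvCountInc : Option Int → List Int → Int
  | _, [] => 0
  | none, n :: rest => 1 + pvCountInc (some n) rest
  | some p, n :: rest => if n > p then 1 + pvCountInc (some n) rest else 0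

def max_series_alt (numbers : List Int) : List Int :=
  let odds := numbers.filter (fun n => decide (PySem.Int.mod n 2 ≠ 0))
  let count := pvCountInc none odds
  -- max of a list that always contains -1, hence nonempty: getD never falls back to its default
  let best3 := (PySem.List.max? ((numbers.filter (fun n => decide (PySem.Int.mod n 3 = 0))) ++ [-1]) (fun y => y)).getD (-1)
  [count, best3]

-- ===== PRECONDITION & SPEC =====
def Spec_max_series (numbers : List Int) (out : List Int) : Prop := out = max_series_alt numbers
instance (numbers : List Int) (out : List Int) : Decidable (Spec_max_series numbers out) := by unfold Spec_max_series; infer_instance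

-- ===== CLAIM (what is proved, stated in full; the proofs are below) =====
def Claim_equal_max_series : Prop := ∀ (numbers : List Int), Dom_max_series numbers → Spec_max_series numbers (max_series numbers)

-- ===== LEMMAS AND PROOFS =====

-- A's d3 component and its (odds, idx, inc) component evolve independently
def pvStep3 (d : Int) (num : Int) : Int := if PySem.Int.mod num 3 = 0 ∧ num > d then num else d

def pvStepO : List Int × Int × Bool → Int → List Int × Int × Bool
  | (odds, idx, inc), num =>
    if PySem.Int.mod num 2 ≠ 0 then
      if odds.length = 0 then (odds ++ [num], idx + 1, inc)
      else if num > PySem.List.pyGetD odds (idx - 1) 0 ∧ inc = true then (odds ++ [num], idx + 1, inc)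
      else (odds, idx, false)
    else (odds, idx, inc)

theorem pvFoldSplit (l : List Int) (d : Int) (st : List Int × Int × Bool) :
    l.foldl pvStepA (d, st) = (l.foldl pvStep3 d, l.foldl pvStepO st) := by
  induction l generalizing d st with
  | nil => rfl
  | cons n t ih =>
      simp only [List.foldl_cons]
      rw [show pvStepA (d, st) n = (pvStep3 d n, pvStepO st n) by
        obtain ⟨odds, idx, inc⟩ := st; rfl, ih]

theorem pvD3_eq (l : List Int) (d : Int) :
    l.foldl pvStep3 d = (l.filter (fun n => decide (PySem.Int.mod n 3 = 0))).foldl max d := by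
  induction l generalizing d with
  | nil => rfl
  | cons n t ih =>
      by_cases h : PySem.Int.mod n 3 = 0
      · rw [List.foldl_cons, List.filter_cons, if_pos (decide_eq_true h), List.foldl_cons]
        rw [show pvStep3 d n = max d n by
          unfold pvStep3
          by_cases hgt : n > d
          · rw [if_pos ⟨h, hgt⟩]; omega
          · rw [if_neg (fun hh => hgt hh.2)]; omega]
        exact ih (max d n)
      · rw [List.foldl_cons, List.filter_cons, if_neg (fun hh => h (of_decide_eq_true hh))]
        rw [show pvStep3 d n = d by
          unfold pvStep3; exact if_neg (fun hh => h hh.1)]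
        exact ih d

theorem pvFoldMaxShift (t : List Int) (a b : Int) :
    t.foldl max (max a b) = max (t.foldl max a) b := by
  induction t generalizing a with
  | nil => rfl
  | cons c t ih =>
      simp only [List.foldl_cons]
      rw [show max (max a b) c = max (max a c) b by omega, ih]

theorem pvBest3_eq (fl : List Int) :
    (PySem.List.max? (fl ++ [-1]) (fun y => y)).getD (-1) = fl.foldl max (-1) := by
  cases fl with
  | nil => simp [PySem.List.max?_id_cons]
  | cons h t =>
      rw [List.cons_append, PySem.List.max?_id_cons, Option.getD_some, List.foldl_append]
      simp only [List.foldl_cons, List.foldl_nil]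
      rw [show max (-1 : Int) h = max h (-1) from max_comm _ _, pvFoldMaxShift]

-- once increase is False and odd_nums is nonempty, A's scanning state never changes
theorem pvFrozen (l : List Int) (odds : List Int) (idx : Int) (h : odds ≠ []) :
    l.foldl pvStepO (odds, idx, false) = (odds, idx, false) := by
  induction l with
  | nil => rfl
  | cons n t ih =>
      simp only [List.foldl_cons]
      rw [show pvStepO (odds, idx, false) n = (odds, idx, false) by
        simp only [pvStepO]
        by_cases hm : PySem.Int.mod n 2 ≠ 0
        · rw [if_pos hm, if_neg (fun hl => h (List.length_eq_zero_iff.mp hl)), if_neg (by simp)]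
        · rw [if_neg hm]]
      exact ih

theorem pvLast_pyGetD (odds : List Int) (h : odds ≠ []) :
    PySem.List.pyGetD odds ((odds.length : Int) - 1) 0 = odds.getLast h := by
  have hl : 0 < odds.length := List.length_pos_iff.mpr h
  rw [PySem.List.pyGetD_eq_getElem odds 0 (by omega) (by omega)]
  rw [List.getLast_eq_getElem]
  congr 1
  omega

-- main invariant, nonempty odd_nums case
theorem pvMainNE (l : List Int) (odds : List Int) (h : odds ≠ []) (inc : Bool) :
    (l.foldl pvStepO (odds, (odds.length : Int), inc)).2.1 =
      (odds.length : Int) +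
        (if inc = true then pvCountInc (some (odds.getLast h)) (l.filter (fun n => decide (PySem.Int.mod n 2 ≠ 0))) else 0) := by
  induction l generalizing odds inc with
  | nil => cases inc <;> simp [pvCountInc]
  | cons n t ih =>
      by_cases ho : PySem.Int.mod n 2 ≠ 0
      · rw [List.foldl_cons, List.filter_cons, if_pos (decide_eq_true ho)]
        by_cases hc : n > odds.getLast h ∧ inc = true
        · rw [show pvStepO (odds, (odds.length : Int), inc) n = (odds ++ [n], ((odds ++ [n]).length : Int), inc) by
            simp only [pvStepO]
            rw [if_pos ho, if_neg (fun hl => h (List.length_eq_zero_iff.mp hl)), if_pos (by rw [pvLast_pyGetD odds h]; exact hc)]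
            simp]
          rw [ih (odds ++ [n]) (by simp) inc, hc.2]
          simp only [if_true, List.getLast_append_singleton]
          rw [show pvCountInc (some (odds.getLast h)) (n :: t.filter (fun n => decide (PySem.Int.mod n 2 ≠ 0)))
              = 1 + pvCountInc (some n) (t.filter (fun n => decide (PySem.Int.mod n 2 ≠ 0))) by
            simp only [pvCountInc]; rw [if_pos hc.1]]
          simp
          omega
        · rw [show pvStepO (odds, (odds.length : Int), inc) n = (odds, (odds.length : Int), false) by
            simp only [pvStepO]
            rw [if_pos ho, if_neg (fun hl => h (List.length_eq_zero_iff.mp hl)), if_neg (by rw [pvLast_pyGetD odds h]; exact hc)]]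
          rw [pvFrozen t odds _ h]
          cases inc with
          | false => simp
          | true =>
              have hnp : ¬ n > odds.getLast h := fun hn => hc ⟨hn, rfl⟩
              simp only [if_true]
              rw [show pvCountInc (some (odds.getLast h)) (n :: t.filter (fun n => decide (PySem.Int.mod n 2 ≠ 0))) = 0 by
                simp only [pvCountInc]; rw [if_neg hnp]]
              simp
      · rw [List.foldl_cons, List.filter_cons, if_neg (fun hh => ho (of_decide_eq_true hh))]
        rw [show pvStepO (odds, (odds.length : Int), inc) n = (odds, (odds.length : Int), inc) by
          simp only [pvStepO]; exact if_neg ho]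
        exact ih odds h inc

-- main invariant, from the initial empty state
theorem pvMain (l : List Int) :
    (l.foldl pvStepO ([], 0, true)).2.1 =
      pvCountInc none (l.filter (fun n => decide (PySem.Int.mod n 2 ≠ 0))) := by
  induction l with
  | nil => rfl
  | cons n t ih =>
      by_cases ho : PySem.Int.mod n 2 ≠ 0
      · rw [List.foldl_cons, List.filter_cons, if_pos (decide_eq_true ho)]
        rw [show pvStepO ([], 0, true) n = ([n], (([n] : List Int).length : Int), true) by
          simp only [pvStepO]; rw [if_pos ho]; simp]
        rw [pvMainNE t [n] (by simp) true]
        simp only [if_true, List.getLast_singleton, List.length_cons, List.length_nil]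
        rw [show pvCountInc none (n :: t.filter (fun n => decide (PySem.Int.mod n 2 ≠ 0)))
            = 1 + pvCountInc (some n) (t.filter (fun n => decide (PySem.Int.mod n 2 ≠ 0))) from rfl]
        push_cast
        omega
      · rw [List.foldl_cons, List.filter_cons, if_neg (fun hh => ho (of_decide_eq_true hh))]
        rw [show pvStepO ([], 0, true) n = ([], 0, true) by simp only [pvStepO]; exact if_neg ho]
        exact ih

-- ===== VERDICT (by name: the statement is the Claim_ definition above) =====
theorem max_series_spec : Claim_equal_max_series := by
  intro numbers _
  unfold Spec_max_series max_series max_series_alt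
  rw [show ((-1 : Int), ([] : List Int), (0 : Int), true) = ((-1 : Int), (([] : List Int), (0 : Int), true)) from rfl]
  rw [pvFoldSplit]
  simp only
  rw [pvMain, pvD3_eq, pvBest3_eq]
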